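-- pv_equiv track=rewrite | github.com/jrodriguezgar/FormuLite | shortfx/fxNumeric/number_theory_functions.py | liouville_lambda
-- ===== SOURCE A (Python) =====
-- def liouville_lambda(n: int) -> int:
--     """Compute the Liouville function λ(n) = (-1)^Ω(n).
--
--     Ω(n) is the number of prime factors of n counted with multiplicity.
--
--     Args:
--         n: Positive integer.
--
--     Returns:
--         1 or -1.
--
--     Raises:
--         TypeError: If n is not an integer.
--         ValueError: If n < 1.
--
--     Usage Example:
--         >>> liouville_lambda(12)
--         -1
--
--     Complexity: O(√n)
--     """
--     if not isinstance(n, int):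
--         raise TypeError("n must be an integer.")
--     if n < 1:
--         raise ValueError("n must be positive.")
--     count = 0
--     temp = n
--     p = 2
--     while p * p <= temp:
--         while temp % p == 0:
--             count += 1
--             temp //= p
--         p += 1
--     if temp > 1:
--         count += 1
--     return 1 if count % 2 == 0 else -1
-- ===== SOURCE B (Python) =====
-- def liouville_lambda(n: int) -> int:
--     """Liouville function via multiplicativity: strip the smallest prime factor
--     and flip the sign, recursing on the cofactor."""
--     if not isinstance(n, int):
--         raise TypeError("n must be an integer.")
--     if n < 1:
--         raise ValueError("n must be positive.")
--     if n == 1: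
--         return 1
--     p = _smallest_prime_factor(n)
--     return -liouville_lambda(n // p)
--
--
-- def _smallest_prime_factor(n: int) -> int:
--     d = 2
--     while d * d <= n:
--         if n % d == 0:
--             return d
--         d += 1
--     return n
-- ===== Notes on version B (the rewrite author's own statement) =====
-- stated objective: alternative
-- what changed: Replaced the nested while-loops that count all prime factors with multiplicity by a recursive formulation using lambda's multiplicativity: each call finds only the smallest prime factor and returns the negation of lambda(n//p).
import Mathlib
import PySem

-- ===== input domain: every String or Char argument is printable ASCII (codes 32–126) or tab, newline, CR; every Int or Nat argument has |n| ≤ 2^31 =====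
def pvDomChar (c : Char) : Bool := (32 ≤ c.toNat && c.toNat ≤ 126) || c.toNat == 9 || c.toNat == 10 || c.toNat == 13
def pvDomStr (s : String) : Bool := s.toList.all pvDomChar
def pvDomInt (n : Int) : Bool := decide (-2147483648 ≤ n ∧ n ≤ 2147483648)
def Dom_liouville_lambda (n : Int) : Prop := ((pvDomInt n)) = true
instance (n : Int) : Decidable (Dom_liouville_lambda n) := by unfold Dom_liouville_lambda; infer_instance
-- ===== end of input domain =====

-- B replaces A's nested factor-counting loops by a recursion that strips the smallest
-- prime factor and flips the sign (multiplicativity of λ); objective: alternative algorithm.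
-- A raises TypeError/ValueError on non-int / n < 1 input; Pre_ excludes n < 1.
-- Both ports run on n.toNat: for n ≥ 1 Python's // and % on positive ints coincide
-- with Nat division/modulo, so the Nat transcription is exact on Pre_.


-- ===== PORT A =====
-- inner `while temp % p == 0: count += 1; temp //= p`; the `2 ≤ p ∧ temp ≠ 0` parts of
-- the guard only make the recursion total — on A's reachable states they always hold
def pvAInner (count temp p : Nat) : Nat × Nat :=
  if h : 2 ≤ p ∧ temp ≠ 0 ∧ temp % p = 0 then
    pvAInner (count + 1) (temp / p) p
  else (count, temp)
termination_by temp
decreasing_by exact Nat.div_lt_self (Nat.pos_of_ne_zero h.2.1) (by omega)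

-- the inner loop never increases temp (cited by the outer loop's termination proof)
theorem pvAInner_snd_le (count temp p : Nat) : (pvAInner count temp p).2 ≤ temp := by
  fun_induction pvAInner count temp p with
  | case1 c t h ih => exact le_trans ih (Nat.div_le_self _ _)
  | case2 c t h => exact le_refl _

-- outer `while p * p <= temp: <inner loop>; p += 1` (again `2 ≤ p` is a totality guard only)
def pvAOuter (count temp p : Nat) : Nat × Nat :=
  if h : p * p ≤ temp ∧ 2 ≤ p then
    pvAOuter (pvAInner count temp p).1 (pvAInner count temp p).2 (p + 1)
  else (count, temp)
termination_by temp + 2 - p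
decreasing_by
  have h1 := pvAInner_snd_le count temp p
  have : p ≤ temp := le_trans (Nat.le_mul_of_pos_left p (by omega)) h.1
  omega

def liouville_lambda (n : Int) : Int :=
  let r := pvAOuter 0 n.toNat 2
  let count := if 1 < r.2 then r.1 + 1 else r.1
  if count % 2 = 0 then 1 else -1

-- ===== PORT B =====
-- `while d * d <= n: if n % d == 0: return d; d += 1` then `return n`
def pvSpfLoop (n d : Nat) : Nat :=
  if h : d * d ≤ n ∧ 2 ≤ d then
    if n % d = 0 then d else pvSpfLoop n (d + 1)
  else n
termination_by n + 2 - d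
decreasing_by
  have : d ≤ n := le_trans (Nat.le_mul_of_pos_left d (by omega)) h.1
  omega

def pvSpf (n : Nat) : Nat := pvSpfLoop n 2

-- the search result is ≥ 2 when n ≥ 2 (cited by pvAltRec's termination proof)
theorem pvSpfLoop_two_le (n d : Nat) : 2 ≤ n → 2 ≤ pvSpfLoop n d := by
  fun_induction pvSpfLoop n d with
  | case1 d h hmod => intro _; omega
  | case2 d h hmod ih => exact ih
  | case3 d h => intro hn; exact hn

def pvAltRec (n : Nat) : Int :=
  if h : n ≤ 1 then 1
  else -pvAltRec (n / pvSpf n)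
termination_by n
decreasing_by
  have h2 : 2 ≤ pvSpf n := pvSpfLoop_two_le n 2 (by omega)
  exact Nat.div_lt_self (by omega) (by omega)

def liouville_lambda_alt (n : Int) : Int := pvAltRec n.toNat

-- ===== PRECONDITION & SPEC =====
-- Python A raises ValueError exactly when n < 1 (the isinstance check is the Int type convention)
def Pre_liouville_lambda (n : Int) : Prop := 1 ≤ n
instance (n : Int) : Decidable (Pre_liouville_lambda n) := by unfold Pre_liouville_lambda; infer_instance
def pvWitness_liouville_lambda : Int := 12

def Spec_liouville_lambda (n : Int) (out : Int) : Prop := out = liouville_lambda_alt n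
instance (n : Int) (out : Int) : Decidable (Spec_liouville_lambda n out) := by unfold Spec_liouville_lambda; infer_instance

-- ===== CLAIM (what is proved, stated in full; the proofs are below) =====
def Claim_equal_liouville_lambda : Prop := ∀ (n : Int), Dom_liouville_lambda n → Pre_liouville_lambda n → Spec_liouville_lambda n (liouville_lambda n)

-- ===== LEMMAS AND PROOFS =====

-- Ω(n): number of prime factors counted with multiplicity
def pvOmega (n : Nat) : Nat := (Nat.primeFactorsList n).length

-- stripping one prime factor decrements Ω
theorem pvOmega_div_prime {p m : Nat} (hp : p.Prime) (hd : p ∣ m) (hm : m ≠ 0) :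
    pvOmega m = pvOmega (m / p) + 1 := by
  obtain ⟨q, hq⟩ := hd
  have hq0 : q ≠ 0 := by rintro rfl; rw [Nat.mul_zero] at hq; exact hm hq
  have hdiv : m / p = q := by rw [hq]; exact Nat.mul_div_cancel_left q hp.pos
  have hlen := (Nat.perm_primeFactorsList_mul hp.ne_zero hq0).length_eq
  rw [Nat.primeFactorsList_prime hp] at hlen
  simp only [List.length_append, List.length_cons, List.length_nil] at hlen
  unfold pvOmega
  rw [hdiv, hq]
  omega

-- if no d with 2 ≤ d < p divides m, and p divides m (m ≥ 2), then p is prime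
theorem pvMinDvd_prime {p m : Nat} (hp : 2 ≤ p) (hm : 2 ≤ m)
    (hinv : ∀ d, 2 ≤ d → d < p → ¬ d ∣ m) (hd : p ∣ m) : p.Prime := by
  have h1 : m.minFac ≤ p := Nat.minFac_le_of_dvd hp hd
  have hpr : m.minFac.Prime := Nat.minFac_prime (by omega)
  have h2 : ¬ m.minFac < p := fun hlt => hinv m.minFac hpr.two_le hlt (Nat.minFac_dvd m)
  have h3 : m.minFac = p := by omega
  rwa [h3] at hpr

-- if no d with 2 ≤ d < p divides m, and m < p², then m is prime (for m ≥ 2)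
theorem pvNoSmallDvd_prime {m p : Nat} (hm : 2 ≤ m) (hpp : m < p * p)
    (hinv : ∀ d, 2 ≤ d → d < p → ¬ d ∣ m) : m.Prime := by
  by_contra hnp
  have hsq := Nat.minFac_sq_le_self (by omega) hnp
  have hpr : m.minFac.Prime := Nat.minFac_prime (by omega)
  have hlt : m.minFac < p := by
    by_contra hge
    have hge' : p ≤ m.minFac := Nat.le_of_not_lt hge
    have hmul : p * p ≤ m.minFac * m.minFac := Nat.mul_le_mul hge' hge'
    have hs : m.minFac ^ 2 = m.minFac * m.minFac := sq m.minFac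
    omega
  exact hinv m.minFac hpr.two_le hlt (Nat.minFac_dvd m)

-- inner-loop invariant: the loop moves the p-multiplicity of temp into count
theorem pvAInner_spec (count temp p : Nat) :
    2 ≤ p → temp ≠ 0 → (∀ d, 2 ≤ d → d < p → ¬ d ∣ temp) →
    (pvAInner count temp p).2 ≠ 0 ∧ ¬ p ∣ (pvAInner count temp p).2 ∧
      (∀ d, 2 ≤ d → d < p → ¬ d ∣ (pvAInner count temp p).2) ∧
      (pvAInner count temp p).1 + pvOmega (pvAInner count temp p).2 = count + pvOmega temp := by
  fun_induction pvAInner count temp p with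
  | case1 c t h ih =>
    intro hp ht hinv
    have hdvd : p ∣ t := Nat.dvd_iff_mod_eq_zero.mpr h.2.2
    have ht2 : 2 ≤ t := le_trans hp (Nat.le_of_dvd (Nat.pos_of_ne_zero ht) hdvd)
    have hpr : p.Prime := pvMinDvd_prime hp ht2 hinv hdvd
    have hq0 : t / p ≠ 0 := by
      have := Nat.div_pos (Nat.le_of_dvd (by omega) hdvd) (by omega)
      omega
    have hinv' : ∀ d, 2 ≤ d → d < p → ¬ d ∣ t / p :=
      fun d h2 h3 hd => hinv d h2 h3 (hd.trans (Nat.div_dvd_of_dvd hdvd))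
    have hΩ := pvOmega_div_prime hpr hdvd ht
    obtain ⟨a1, a2, a3, a4⟩ := ih hp hq0 hinv'
    exact ⟨a1, a2, a3, by omega⟩
  | case2 c t h =>
    intro hp ht hinv
    refine ⟨ht, ?_, hinv, rfl⟩
    intro hd
    exact h ⟨hp, ht, Nat.dvd_iff_mod_eq_zero.mp hd⟩

-- outer-loop spec: the produced (count, temp) satisfies A's final accounting of Ω
theorem pvAOuter_spec (count temp p : Nat) :
    2 ≤ p → temp ≠ 0 → (∀ d, 2 ≤ d → d < p → ¬ d ∣ temp) →
    (if 1 < (pvAOuter count temp p).2 then (pvAOuter count temp p).1 + 1 else (pvAOuter count temp p).1)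
      = count + pvOmega temp := by
  fun_induction pvAOuter count temp p with
  | case1 c t p h ih =>
    intro hp ht hinv
    obtain ⟨a1, a2, a3, a4⟩ := pvAInner_spec c t p hp ht hinv
    have hinv' : ∀ d, 2 ≤ d → d < p + 1 → ¬ d ∣ (pvAInner c t p).2 := by
      intro d h2 h3
      rcases Nat.lt_succ_iff_lt_or_eq.mp h3 with hlt | heq
      · exact a3 d h2 hlt
      · subst heq; exact a2
    have hmain := ih (by omega) a1 hinv'
    omega
  | case2 c t p h =>
    intro hp ht hinv
    have hns : ¬ p * p ≤ t := fun hle => h ⟨hle, hp⟩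
    by_cases h1 : t = 1
    · subst h1
      simp [pvOmega, Nat.primeFactorsList_one]
    · have h2 : 2 ≤ t := by omega
      have hpp : t < p * p := by omega
      have hprime : t.Prime := pvNoSmallDvd_prime h2 hpp hinv
      simp only [if_pos (show (1:Nat) < t by omega)]
      simp [pvOmega, Nat.primeFactorsList_prime hprime]

-- A computes the parity of Ω
theorem liouville_lambda_eq_parity (n : Int) (hn : 1 ≤ n) :
    liouville_lambda n = if pvOmega n.toNat % 2 = 0 then 1 else -1 := by
  have hnt : n.toNat ≠ 0 := by omega
  have h := pvAOuter_spec 0 n.toNat 2 (by omega) hnt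
    (fun d h2 h3 => absurd h3 (by omega))
  show (if (if 1 < (pvAOuter 0 n.toNat 2).2 then (pvAOuter 0 n.toNat 2).1 + 1
          else (pvAOuter 0 n.toNat 2).1) % 2 = 0 then (1:Int) else -1) = _
  rw [h, Nat.zero_add]

-- the trial-division search finds the smallest prime factor
theorem pvSpfLoop_eq_minFac (n d : Nat) :
    2 ≤ n → 2 ≤ d → d ≤ n.minFac → pvSpfLoop n d = n.minFac := by
  fun_induction pvSpfLoop n d with
  | case1 d h hmod =>
    intro hn hd hle
    have hdvd : d ∣ n := Nat.dvd_iff_mod_eq_zero.mpr hmod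
    have := Nat.minFac_le_of_dvd h.2 hdvd
    omega
  | case2 d h hmod ih =>
    intro hn hd hle
    have hne : d ≠ n.minFac :=
      fun he => hmod (Nat.dvd_iff_mod_eq_zero.mp (he ▸ Nat.minFac_dvd n))
    exact ih hn (by omega) (by omega)
  | case3 d h =>
    intro hn hd hle
    have hns : ¬ d * d ≤ n := fun hle2 => h ⟨hle2, hd⟩
    have hprime : n.Prime := by
      by_contra hnp
      have hsq := Nat.minFac_sq_le_self (by omega) hnp
      have hmul : d * d ≤ n.minFac * n.minFac := Nat.mul_le_mul hle hle
      have hs : n.minFac ^ 2 = n.minFac * n.minFac := sq n.minFac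
      omega
    exact (Nat.Prime.minFac_eq hprime).symm

-- B computes the parity of Ω
theorem pvAltRec_eq_parity (n : Nat) :
    pvAltRec n = if pvOmega n % 2 = 0 then 1 else -1 := by
  fun_induction pvAltRec n with
  | case1 n h =>
    interval_cases n <;>
      simp [pvOmega, Nat.primeFactorsList_zero, Nat.primeFactorsList_one]
  | case2 n h ih =>
    have hn2 : 2 ≤ n := by omega
    have hmf : pvSpf n = n.minFac :=
      pvSpfLoop_eq_minFac n 2 hn2 (by omega) (Nat.minFac_prime (by omega : n ≠ 1)).two_le
    have hΩ := pvOmega_div_prime (Nat.minFac_prime (by omega : n ≠ 1)) (Nat.minFac_dvd n) (by omega)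
    rw [hmf] at ih ⊢
    rw [ih, hΩ]
    by_cases hpar : pvOmega (n / n.minFac) % 2 = 0
    · rw [if_pos hpar, if_neg (by omega)]
    · rw [if_neg hpar, if_pos (by omega)]
      norm_num

-- ===== VERDICT (by name: the statement is the Claim_ definition above) =====
theorem liouville_lambda_spec : Claim_equal_liouville_lambda := by
  intro n _ hpre
  unfold Spec_liouville_lambda liouville_lambda_alt
  rw [liouville_lambda_eq_parity n hpre, pvAltRec_eq_parity]
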